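-- pv_equiv track=rewrite | github.com/Kraunser/Davinci_Decoder | api_server.py | _normalize_wordlist
-- ===== SOURCE A (Python) =====
-- from typing import Any, Dict, List, Optional
--
-- MAX_WORDLIST_ITEMS = 20_000
--
-- MAX_WORD_LENGTH = 256
--
-- def _normalize_wordlist(raw_wordlist: Any) -> List[str]:
--     if raw_wordlist is None:
--         return []
--     if not isinstance(raw_wordlist, list):
--         raise ValueError("wordlist must be a list")
--
--     normalized: List[str] = []
--     seen = set()
--     for item in raw_wordlist:
--         word = str(item).strip()
--         if not word:
--             continue
--         if len(word) > MAX_WORD_LENGTH: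
--             word = word[:MAX_WORD_LENGTH]
--         if word in seen:
--             continue
--         seen.add(word)
--         normalized.append(word)
--         if len(normalized) >= MAX_WORDLIST_ITEMS:
--             break
--
--     return normalized
-- ===== SOURCE B (Python) =====
-- from typing import Any, List
--
-- MAX_WORDLIST_ITEMS = 20_000
-- MAX_WORD_LENGTH = 256
--
-- def _normalize_wordlist(raw_wordlist: Any) -> List[str]:
--     if raw_wordlist is None:
--         return []
--     if not isinstance(raw_wordlist, list):
--         raise ValueError("wordlist must be a list")
--     words = [str(item).strip()[:MAX_WORD_LENGTH]
--              for item in raw_wordlist if str(item).strip()]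
--     firsts = [w for i, w in enumerate(words) if w not in words[:i]]
--     return firsts[:MAX_WORDLIST_ITEMS]
-- ===== Notes on version B (the rewrite author's own statement) =====
-- stated objective: alternative
-- what changed: Replaces A's single incremental loop with a seen-set, conditional truncation and an early break by staged passes with no auxiliary set at all: a strip/filter/truncate comprehension, then a first-occurrence filter that decides duplicates by brute-force membership in the prefix words[:i], then a final cap slice; B trades A's O(n) hash-set dedup for an O(n^2) prefix-scan dedup.
import Mathlib
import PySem

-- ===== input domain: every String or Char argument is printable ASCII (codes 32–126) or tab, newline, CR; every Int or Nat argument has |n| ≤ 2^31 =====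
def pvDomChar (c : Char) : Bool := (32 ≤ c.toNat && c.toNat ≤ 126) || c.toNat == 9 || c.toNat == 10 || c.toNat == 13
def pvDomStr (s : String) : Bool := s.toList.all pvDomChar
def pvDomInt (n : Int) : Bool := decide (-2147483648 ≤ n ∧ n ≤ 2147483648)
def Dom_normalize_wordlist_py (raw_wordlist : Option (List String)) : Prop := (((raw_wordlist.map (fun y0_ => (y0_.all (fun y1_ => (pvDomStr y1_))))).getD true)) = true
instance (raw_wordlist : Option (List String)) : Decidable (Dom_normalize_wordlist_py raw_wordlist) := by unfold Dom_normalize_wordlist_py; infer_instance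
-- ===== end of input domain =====

-- B replaces A's incremental loop (seen-set + append + early break) by staged passes with
-- no auxiliary set: a strip/filter/truncate comprehension, a first-occurrence filter that
-- decides duplicates by membership in the prefix words[:i], and a final cap slice
-- (objective: alternative; B is not faster).

-- ===== PORT A =====
-- the loop: state = (normalized, seen), early break at MAX_WORDLIST_ITEMS = 20000
def normAloop : List String → List String → PySem.Set String → List String
  | [], normalized, _ => normalized
  | item :: rest, normalized, seen =>
    -- str(item) is the identity on a str item
    let word := PySem.Str.strip item
    if word = "" then normAloop rest normalized seen
    else
      let word := if 256 < PySem.Str.len word then PySem.Str.slice word none (some 256) else word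
      if PySem.Set.contains seen word then normAloop rest normalized seen
      else
        let normalized' := normalized ++ [word]
        if 20000 ≤ normalized'.length then normalized'
        else normAloop rest normalized' (PySem.Set.add seen word)

def normalize_wordlist_py (raw_wordlist : Option (List String)) : List String :=
  match raw_wordlist with
  | none => []
  | some xs => normAloop xs [] PySem.Set.empty

-- ===== PORT B =====
-- the first comprehension's body: str(item).strip(), drop empties, truncate [:256]
def pvWordB (item : String) : Option String :=
  let w := PySem.Str.strip item
  if w = "" then none else some (PySem.Str.slice w none (some 256))

def normalize_wordlist_py_alt (raw_wordlist : Option (List String)) : List String :=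
  match raw_wordlist with
  | none => []
  | some xs =>
    let words := xs.filterMap pvWordB
    -- [w for i, w in enumerate(words) if w not in words[:i]]
    let firsts := (PySem.List.enumerate words 0).filterMap
      (fun p => if (PySem.List.slice words none (some p.1)).contains p.2 then none else some p.2)
    PySem.List.slice firsts none (some 20000)

-- ===== PRECONDITION & SPEC =====
def Spec_normalize_wordlist_py (raw_wordlist : Option (List String)) (out : List String) : Prop := out = normalize_wordlist_py_alt raw_wordlist
instance (raw_wordlist : Option (List String)) (out : List String) : Decidable (Spec_normalize_wordlist_py raw_wordlist out) := by unfold Spec_normalize_wordlist_py; infer_instance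

-- ===== CLAIM (what is proved, stated in full; the proofs are below) =====
def Claim_equal_normalize_wordlist_py : Prop := ∀ (raw_wordlist : Option (List String)), Dom_normalize_wordlist_py raw_wordlist → Spec_normalize_wordlist_py raw_wordlist (normalize_wordlist_py raw_wordlist)

-- ===== LEMMAS AND PROOFS =====

-- ordered dedup relative to an already-seen prefix
def dedupRel (seen : List String) : List String → List String
  | [] => []
  | w :: ws =>
    if PySem.Set.contains seen w then dedupRel seen ws
    else w :: dedupRel (seen ++ [w]) ws

-- A's conditional truncation equals B's unconditional slice
theorem trunc_eq (w : String) :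
    (if 256 < PySem.Str.len w then PySem.Str.slice w none (some 256) else w) =
      PySem.Str.slice w none (some 256) := by
  split_ifs with h
  · rfl
  · unfold PySem.Str.slice
    simp only [PySem.Chars.slice_eq_listSlice]
    rw [show (256 : Int) = ((256 : Nat) : Int) by norm_num, PySem.List.slice_to_natCast]
    rw [List.take_of_length_le]
    · exact String.ofList_toList.symm
    · have : PySem.Str.len w = (w.toList.length : Int) := by
        simp [PySem.Str.len]
      omega

theorem normAloop_eq (xs : List String) : ∀ acc : List String, acc.length < 20000 →
    normAloop xs acc acc =
      acc ++ (dedupRel acc (xs.filterMap pvWordB)).take (20000 - acc.length) := by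
  induction xs with
  | nil => intro acc _; simp [normAloop, dedupRel]
  | cons item rest ih =>
    intro acc hlen
    rw [List.filterMap_cons]
    by_cases hw : PySem.Str.strip item = ""
    · have hB : pvWordB item = none := by simp [pvWordB, hw]
      rw [hB]
      show normAloop (item :: rest) acc acc = _
      simp only [normAloop, hw, if_pos]
      exact ih acc hlen
    · set word := PySem.Str.slice (PySem.Str.strip item) none (some 256) with hword
      have hB : pvWordB item = some word := by rw [hword]; simp [pvWordB, hw]
      rw [hB]
      show normAloop (item :: rest) acc acc = _
      simp only [normAloop]
      rw [if_neg hw, trunc_eq, ← hword]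
      simp only [dedupRel]
      by_cases hc : PySem.Set.contains acc word
      · rw [if_pos hc, if_pos hc]
        exact ih acc hlen
      · rw [if_neg hc, if_neg hc]
        have hadd : PySem.Set.add acc word = acc ++ [word] := by
          simp only [PySem.Set.add, if_neg hc]
        obtain ⟨m, hm⟩ : ∃ m, 20000 - acc.length = m + 1 := ⟨20000 - acc.length - 1, by omega⟩
        rw [hm, List.take_succ_cons]
        by_cases hfull : 20000 ≤ (acc ++ [word]).length
        · rw [if_pos hfull]
          have hm0 : m = 0 := by
            simp only [List.length_append, List.length_cons, List.length_nil] at hfull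
            omega
          simp [hm0]
        · rw [if_neg hfull, hadd]
          have hlen' : (acc ++ [word]).length < 20000 := by omega
          rw [ih (acc ++ [word]) hlen']
          have hm' : 20000 - (acc ++ [word]).length = m := by
            simp only [List.length_append, List.length_cons, List.length_nil]
            omega
          rw [hm']
          simp

-- dedupRel only consults membership of its seen-prefix
theorem dedupRel_congr (l : List String) : ∀ s t : List String,
    (∀ x, x ∈ s ↔ x ∈ t) → dedupRel s l = dedupRel t l := by
  induction l with
  | nil => intro s t _; rfl
  | cons w ws ih =>
    intro s t h
    simp only [dedupRel]
    have hmem : PySem.Set.contains s w = PySem.Set.contains t w := by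
      simp only [PySem.Set.contains_eq_listContains]
      by_cases hw : w ∈ s
      · simp [hw, (h w).mp hw]
      · have hwt : w ∉ t := fun hz => hw ((h w).mpr hz)
        simp [hw, hwt]
    rw [hmem]
    by_cases hc : PySem.Set.contains t w
    · rw [if_pos hc, if_pos hc]
      exact ih s t h
    · rw [if_neg hc, if_neg hc]
      congr 1
      refine ih _ _ (fun x => ?_)
      simp only [List.mem_append, List.mem_singleton]
      exact or_congr_left (h x)

-- B's enumerate/prefix-membership filter equals the relative ordered dedup
theorem enumFilter_eq_dedupRel (l : List String) : ∀ pre : List String,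
    (PySem.List.enumerate l (pre.length : Int)).filterMap
      (fun p => if (PySem.List.slice (pre ++ l) none (some p.1)).contains p.2 then none
                else some p.2)
      = dedupRel pre l := by
  induction l with
  | nil => intro pre; simp [PySem.List.enumerate_nil, dedupRel]
  | cons w ws ih =>
    intro pre
    rw [PySem.List.enumerate_cons, List.filterMap_cons]
    have hslice : PySem.List.slice (pre ++ w :: ws) none (some ((pre.length : Nat) : Int)) = pre := by
      rw [PySem.List.slice_to_natCast]
      exact List.take_left ..
    have hassoc : pre ++ w :: ws = (pre ++ [w]) ++ ws := by simp
    have hlen1 : (pre.length : Int) + 1 = ((pre ++ [w]).length : Int) := by simp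
    have htail : (PySem.List.enumerate ws ((pre.length : Int) + 1)).filterMap
        (fun p => if (PySem.List.slice (pre ++ w :: ws) none (some p.1)).contains p.2 then none
                  else some p.2) = dedupRel (pre ++ [w]) ws := by
      rw [hlen1, hassoc]
      exact ih (pre ++ [w])
    simp only [hslice, dedupRel]
    by_cases hc : w ∈ pre
    · have hcontains : pre.contains w = true := by simpa using hc
      have hset : PySem.Set.contains pre w = true := by
        simpa [PySem.Set.contains_eq_listContains] using hcontains
      rw [hcontains, if_pos rfl, hset, if_pos rfl, htail]
      refine dedupRel_congr ws _ _ (fun x => ?_)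
      simp only [List.mem_append, List.mem_singleton]
      constructor
      · rintro (hx | rfl)
        · exact hx
        · exact hc
      · exact Or.inl
    · have hcontains : pre.contains w = false := by simpa using hc
      have hset : PySem.Set.contains pre w = false := by
        simpa [PySem.Set.contains_eq_listContains] using hcontains
      rw [hcontains, if_neg (by simp), hset, if_neg (by simp), htail]

-- ===== VERDICT (by name: the statement is the Claim_ definition above) =====
theorem normalize_wordlist_py_spec : Claim_equal_normalize_wordlist_py := by
  intro raw _
  unfold Spec_normalize_wordlist_py normalize_wordlist_py normalize_wordlist_py_alt
  cases raw with
  | none => rfl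
  | some xs =>
    show normAloop xs [] PySem.Set.empty = _
    have h0 : PySem.Set.empty (α := String) = ([] : List String) := rfl
    rw [h0, normAloop_eq xs [] (by simp)]
    have h1 : (PySem.List.enumerate (xs.filterMap pvWordB) 0).filterMap
        (fun p => if (PySem.List.slice (xs.filterMap pvWordB) none (some p.1)).contains p.2
                  then none else some p.2)
        = dedupRel [] (xs.filterMap pvWordB) := by
      have := enumFilter_eq_dedupRel (xs.filterMap pvWordB) []
      simpa using this
    simp only [h1]
    rw [PySem.List.slice_to (dedupRel [] (xs.filterMap pvWordB)) (by norm_num : (0:Int) ≤ (20000:Int))]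
    norm_num
    rfl
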